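-- pv_equiv track=rewrite | github.com/tyrrr-aj/Python-logic-expressions | logika3.py | check
-- ===== SOURCE A (Python) =====
-- def check(expression): # checks if given expression is correct
--     import string
--
--     operators = ['&', '|', '>', '=', '^']
--     chars = string.ascii_letters + '_'
--     digits = string.digits
--     constants = ['0', '1']
--     prefix_operators = ['~']
--     state = 1 # we will use simple final state machine with possible states:
--     # 0 - expected are:
--     #       char or digit (from a variable name, not starting it - digit is allowed), leading to state 0
--     #       whitespace (after a variable name), leading to state 2
--     #       operator, leading to state 1
--     #       closing bracket, leading to state 2
--     # 1 - initial one, also one that expression should end in; expected are: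
--     #       char (not digit - it's the beginning of variable name), leading to state 0
--     #       logical constant (0 or 1), leading to state 2
--     #       whitespace, leading to state 1
--     #       prefix operator, leading to state 1
--     #       opening bracket, leading to state 1
--     # 2 - expected are:
--     #       operator, leading to state 1
--     #       whitespace, leading to state 2
--     #       closing bracket, leading to state 2
--     brackets = 0 # increased with every found opening bracket, decreased for every closing one
--     for e in expression: # we iterate through every char of expression:
--         if state == 0:
--             if (e in chars) | (e in digits):
--                 state = 0
--             elif e == ' ':
--                 state = 2
--             elif e in operators:
--                 state = 1
--             elif e == ')':
--                 brackets -= 1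
--                 state = 2
--                 if brackets < 0: # at any time, there can't be more closing than opening brackets
--                     return False
--             else:
--                 return False # if char was none of the above, it shouldn't be there
--         elif state == 1:
--             if e in constants:
--                 state = 2
--             elif (e == ' ') | (e in prefix_operators):
--                 pass # state = 1
--             elif e == '(':
--                 brackets += 1 # state = 1
--             elif e in chars:
--                 state = 0
--             else:
--                 return False
--         else: # state == 2
--             if e in operators:
--                 state = 1
--             elif e == ')':
--                 brackets -= 1
--                 if brackets < 0:
--                     return False
--             elif e == ' ':
--                 pass # state = 2
--             else:
--                 return False
--     if brackets == 0 and state != 1: # number of opening and closing brackets must be equal, and processing should stop at state 1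
--         return True
--     return False
-- ===== SOURCE B (Python) =====
-- def check(expression):
--     import string
--     chars = string.ascii_letters + '_'
--     digits = string.digits
--     operators = '&|>=^'
--
--     def final_state(s):
--         # grammar pass only: run the FSM, no bracket counting; None on illegal char
--         state = 1
--         for e in s:
--             if state == 0:
--                 if e in chars or e in digits:
--                     state = 0
--                 elif e == ' ':
--                     state = 2
--                 elif e in operators:
--                     state = 1
--                 elif e == ')':
--                     state = 2
--                 else:
--                     return None
--             elif state == 1:
--                 if e == '0' or e == '1':
--                     state = 2
--                 elif e == ' ' or e == '~' or e == '(':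
--                     state = 1
--                 elif e in chars:
--                     state = 0
--                 else:
--                     return None
--             else:
--                 if e in operators:
--                     state = 1
--                 elif e == ')' or e == ' ':
--                     state = 2
--                 else:
--                     return None
--         return state
--
--     def balanced(s):
--         # independent bracket-balance pass
--         depth = 0
--         for e in s:
--             if e == '(':
--                 depth += 1
--             elif e == ')':
--                 depth -= 1
--                 if depth < 0:
--                     return False
--         return depth == 0
--
--     st = final_state(expression)
--     return st is not None and st != 1 and balanced(expression)
-- ===== Notes on version B (the rewrite author's own statement) =====
-- stated objective: alternative
-- what changed: A's single fused pass that interleaves the FSM with bracket counting is split into two independent passes: a pure grammar FSM returning the final state (or failure), and a separate bracket-balance scan; the result combines the two.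
import Mathlib
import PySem

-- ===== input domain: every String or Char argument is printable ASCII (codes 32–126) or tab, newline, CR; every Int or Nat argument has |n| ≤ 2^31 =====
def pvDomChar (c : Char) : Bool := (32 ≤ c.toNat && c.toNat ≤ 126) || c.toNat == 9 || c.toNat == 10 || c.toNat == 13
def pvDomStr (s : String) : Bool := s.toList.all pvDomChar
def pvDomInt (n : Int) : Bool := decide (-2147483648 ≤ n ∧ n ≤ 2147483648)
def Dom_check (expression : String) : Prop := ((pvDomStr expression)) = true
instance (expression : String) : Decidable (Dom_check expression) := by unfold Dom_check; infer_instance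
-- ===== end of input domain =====

-- B replaces A's fused FSM+bracket-counter single pass by two independent passes (grammar FSM, then bracket balance); alternative decomposition, no speed claim.

-- ===== PORT A =====
def pvChars : List Char := "abcdefghijklmnopqrstuvwxyzABCDEFGHIJKLMNOPQRSTUVWXYZ_".toList
def pvDigits : List Char := "0123456789".toList
def pvOperators : List Char := ['&', '|', '>', '=', '^']
def pvConstants : List Char := ['0', '1']
def pvPrefixOps : List Char := ['~']

def checkLoop : List Char → Int → Int → Bool
  | [], state, brackets => brackets == 0 && state != 1
  | e :: rest, state, brackets =>
    if state == 0 then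
      if pvChars.contains e || pvDigits.contains e then checkLoop rest 0 brackets
      else if e == ' ' then checkLoop rest 2 brackets
      else if pvOperators.contains e then checkLoop rest 1 brackets
      else if e == ')' then
        if brackets - 1 < 0 then false else checkLoop rest 2 (brackets - 1)
      else false
    else if state == 1 then
      if pvConstants.contains e then checkLoop rest 2 brackets
      else if e == ' ' || pvPrefixOps.contains e then checkLoop rest 1 brackets
      else if e == '(' then checkLoop rest 1 (brackets + 1)
      else if pvChars.contains e then checkLoop rest 0 brackets
      else false
    else
      if pvOperators.contains e then checkLoop rest 1 brackets
      else if e == ')' then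
        if brackets - 1 < 0 then false else checkLoop rest 2 (brackets - 1)
      else if e == ' ' then checkLoop rest 2 brackets
      else false

def check (expression : String) : Bool := checkLoop expression.toList 1 0

-- ===== PORT B =====
-- grammar pass: same FSM, no bracket counting; none = illegal character/transition
def gramLoop : List Char → Int → Option Int
  | [], state => some state
  | e :: rest, state =>
    if state == 0 then
      if pvChars.contains e || pvDigits.contains e then gramLoop rest 0
      else if e == ' ' then gramLoop rest 2
      else if pvOperators.contains e then gramLoop rest 1
      else if e == ')' then gramLoop rest 2
      else none
    else if state == 1 then
      if e == '0' || e == '1' then gramLoop rest 2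
      else if e == ' ' || e == '~' || e == '(' then gramLoop rest 1
      else if pvChars.contains e then gramLoop rest 0
      else none
    else
      if pvOperators.contains e then gramLoop rest 1
      else if e == ')' || e == ' ' then gramLoop rest 2
      else none

-- balance pass: independent of the FSM
def balLoop : List Char → Int → Bool
  | [], depth => depth == 0
  | e :: rest, depth =>
    if e == '(' then balLoop rest (depth + 1)
    else if e == ')' then
      if depth - 1 < 0 then false else balLoop rest (depth - 1)
    else balLoop rest depth

def check_alt (expression : String) : Bool :=
  match gramLoop expression.toList 1 with
  | none => false
  | some s => s != 1 && balLoop expression.toList 0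

-- ===== PRECONDITION & SPEC =====
def Spec_check (expression : String) (out : Bool) : Prop := out = check_alt expression
instance (expression : String) (out : Bool) : Decidable (Spec_check expression out) := by unfold Spec_check; infer_instance

-- ===== CLAIM (what is proved, stated in full; the proofs are below) =====
def Claim_equal_check : Prop := ∀ (expression : String), Dom_check expression → Spec_check expression (check expression)

-- ===== LEMMAS AND PROOFS =====

lemma chars_not_paren {e : Char} (h : e ∈ pvChars) : e ≠ '(' ∧ e ≠ ')' := by
  constructor <;> rintro rfl <;> exact absurd h (by decide)

lemma digits_not_paren {e : Char} (h : e ∈ pvDigits) : e ≠ '(' ∧ e ≠ ')' := by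
  constructor <;> rintro rfl <;> exact absurd h (by decide)

lemma ops_not_paren {e : Char} (h : e ∈ pvOperators) : e ≠ '(' ∧ e ≠ ')' := by
  constructor <;> rintro rfl <;> exact absurd h (by decide)

lemma bal_skip {e : Char} (rest : List Char) (d : Int) (h1 : e ≠ '(') (h2 : e ≠ ')') :
    balLoop (e :: rest) d = balLoop rest d := by
  simp [balLoop, h1, h2]

lemma bal_close (rest : List Char) (d : Int) :
    balLoop (')' :: rest) d = if d - 1 < 0 then false else balLoop rest (d - 1) := by
  simp [balLoop]

lemma loop_eq : ∀ (l : List Char) (st br : Int), st = 0 ∨ st = 1 ∨ st = 2 →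
    checkLoop l st br =
      (match gramLoop l st with
       | none => false
       | some s => s != 1 && balLoop l br) := by
  intro l
  induction l with
  | nil =>
      rintro st br (rfl | rfl | rfl) <;> simp [checkLoop, gramLoop, balLoop, Bool.and_comm]
  | cons e rest ih =>
      rintro st br (rfl | rfl | rfl)
      · -- state 0
        by_cases hc : e ∈ pvChars ∨ e ∈ pvDigits
        · have hnp : e ≠ '(' ∧ e ≠ ')' := by
            rcases hc with h | h
            · exact chars_not_paren h
            · exact digits_not_paren h
          simp only [checkLoop, gramLoop]
          rw [bal_skip rest br hnp.1 hnp.2]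
          simp [hc, ih 0 br (Or.inl rfl)]
        · by_cases hs : e = ' '
          · subst hs
            simp only [checkLoop, gramLoop]
            rw [bal_skip rest br (by decide) (by decide)]
            simp [hc, ih 2 br (Or.inr (Or.inr rfl))]
          · by_cases ho : e ∈ pvOperators
            · have hnp := ops_not_paren ho
              simp only [checkLoop, gramLoop]
              rw [bal_skip rest br hnp.1 hnp.2]
              simp [hc, hs, ho, ih 1 br (Or.inr (Or.inl rfl))]
            · by_cases hp : e = ')'
              · subst hp
                simp only [checkLoop, gramLoop]
                rw [bal_close rest br]
                by_cases hneg : br - 1 < 0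
                · simp only [hc, hs, ho, hneg]
                  cases hg : gramLoop rest 2 <;> simp [hc, ho, hneg, hg]
                · simp [hc, ho, hneg, ih 2 (br - 1) (Or.inr (Or.inr rfl))]
              · simp only [checkLoop, gramLoop]
                simp [hc, hs, ho, hp]
      · -- state 1
        by_cases hk : e = '0' ∨ e = '1'
        · have hnp : e ≠ '(' ∧ e ≠ ')' := by
            rcases hk with rfl | rfl <;> exact ⟨by decide, by decide⟩
          have hk' : e ∈ pvConstants := by
            rcases hk with rfl | rfl <;> decide
          simp only [checkLoop, gramLoop]
          rw [bal_skip rest br hnp.1 hnp.2]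
          simp [hk, hk', ih 2 br (Or.inr (Or.inr rfl))]
        · have hk' : e ∉ pvConstants := by
            simp only [pvConstants, List.mem_cons, List.not_mem_nil, or_false]
            tauto
          by_cases hsp : e = ' ' ∨ e = '~'
          · have hpp : e = ' ' ∨ e ∈ pvPrefixOps := by
              rcases hsp with rfl | rfl
              · exact Or.inl rfl
              · exact Or.inr (by decide)
            have hnp : e ≠ '(' ∧ e ≠ ')' := by
              rcases hsp with rfl | rfl <;> exact ⟨by decide, by decide⟩
            simp only [checkLoop, gramLoop]
            rw [bal_skip rest br hnp.1 hnp.2]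
            simp [hk, hk', hpp, hsp, ih 1 br (Or.inr (Or.inl rfl))]
          · have hpp : ¬(e = ' ' ∨ e ∈ pvPrefixOps) := by
              simp only [pvPrefixOps, List.mem_cons, List.not_mem_nil, or_false]
              tauto
            by_cases hop : e = '('
            · subst hop
              simp only [checkLoop, gramLoop, balLoop]
              simp [hk, hk', hpp, hsp, pvPrefixOps, pvConstants, ih 1 (br + 1) (Or.inr (Or.inl rfl))]
            · by_cases hch : e ∈ pvChars
              · have hnp := chars_not_paren hch
                simp only [checkLoop, gramLoop]
                rw [bal_skip rest br hnp.1 hnp.2]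
                simp [hk, hk', hpp, hsp, hop, hch, ih 0 br (Or.inl rfl)]
              · simp only [checkLoop, gramLoop]
                simp [hk, hk', hpp, hsp, hop, hch]
      · -- state 2
        by_cases ho : e ∈ pvOperators
        · have hnp := ops_not_paren ho
          simp only [checkLoop, gramLoop]
          rw [bal_skip rest br hnp.1 hnp.2]
          simp [ho, ih 1 br (Or.inr (Or.inl rfl))]
        · by_cases hp : e = ')'
          · subst hp
            simp only [checkLoop, gramLoop]
            rw [bal_close rest br]
            by_cases hneg : br - 1 < 0
            · simp only [ho, hneg]
              cases hg : gramLoop rest 2 <;> simp [ho, hneg, hg]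
            · simp [ho, hneg, ih 2 (br - 1) (Or.inr (Or.inr rfl))]
          · by_cases hs : e = ' '
            · subst hs
              simp only [checkLoop, gramLoop]
              rw [bal_skip rest br (by decide) (by decide)]
              simp [ho, ih 2 br (Or.inr (Or.inr rfl))]
            · simp only [checkLoop, gramLoop]
              simp [ho, hp, hs]

-- ===== VERDICT (by name: the statement is the Claim_ definition above) =====
theorem check_spec : Claim_equal_check := by
  intro expression _
  unfold Spec_check check check_alt
  exact loop_eq expression.toList 1 0 (Or.inr (Or.inl rfl))
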